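-- pv_equiv track=rewrite | github.com/adaptco/A2A_MCP | app/services/music_video_generator.py | plan_clip_durations
-- ===== SOURCE A (Python) =====
-- ALLOWED_CLIP_SECONDS = (12, 8, 4)
--
-- def plan_clip_durations(
--
--     target_seconds: int,
--     preferred_clip_seconds: int | None = None,
-- ) -> list[int]:
--     allowed = list(ALLOWED_CLIP_SECONDS)
--     if preferred_clip_seconds in ALLOWED_CLIP_SECONDS:
--         allowed = [preferred_clip_seconds] + [
--             value for value in allowed if value != preferred_clip_seconds
--         ]
--
--     max_total = max(target_seconds + max(ALLOWED_CLIP_SECONDS), max(ALLOWED_CLIP_SECONDS))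
--     dp: dict[int, list[int]] = {0: []}
--     for total in range(1, max_total + 1):
--         best: list[int] | None = None
--         for clip_length in allowed:
--             previous = dp.get(total - clip_length)
--             if previous is None:
--                 continue
--             candidate = previous + [clip_length]
--             if best is None:
--                 best = candidate
--                 continue
--             if len(candidate) < len(best):
--                 best = candidate
--                 continue
--             if len(candidate) == len(best) and sum(candidate) > sum(best):
--                 best = candidate
--         if best is not None:
--             dp[total] = best
--
--     viable = [
--         clips
--         for total, clips in dp.items()
--         if total >= min(ALLOWED_CLIP_SECONDS) and clips
--     ]
--     viable.sort(
--         key=lambda clips: (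
--             abs(sum(clips) - target_seconds),
--             len(clips),
--             -sum(clips),
--         )
--     )
--     return viable[0] if viable else [4]
-- ===== SOURCE B (Python) =====
-- def plan_clip_durations(target_seconds, preferred_clip_seconds=None):
--     # Closest feasible total: a multiple of 4, at least 4.
--     if target_seconds < 4:
--         total = 4
--     else:
--         q, r = divmod(target_seconds, 4)
--         if r < 2:
--             total = 4 * q
--         elif r > 2:
--             total = 4 * (q + 1)
--         else:
--             # tie: the lower total wins only when it needs strictly fewer clips
--             total = 4 * q if q % 3 == 0 else 4 * (q + 1)
--     k = total // 4                  # number of 4-second units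
--     m = (k + 2) // 3                # minimal number of clips
--     rem = k % 3
--     if rem == 0:
--         return [12] * m
--     if rem == 2:
--         if preferred_clip_seconds == 8:
--             return [12] * (m - 1) + [8]
--         return [8] + [12] * (m - 1)
--     # rem == 1
--     if k == 1:
--         return [4]
--     if preferred_clip_seconds == 4:
--         return [12] * (m - 1) + [4]
--     if preferred_clip_seconds == 8:
--         return [12] * (m - 2) + [8, 8]
--     return [4] + [12] * (m - 1)
-- ===== Notes on version B (the rewrite author's own statement) =====
-- stated objective: faster
-- what changed: Replaced the O(target^2) dynamic-programming table (lists stored per reachable total, then a full sort of all viable plans) by a purely arithmetic closed form: the chosen total is the closest feasible multiple of 4 (tie broken toward fewer clips, then the larger total) and the clip list is built directly from k mod 3 and the preferred clip.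
import Mathlib
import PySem

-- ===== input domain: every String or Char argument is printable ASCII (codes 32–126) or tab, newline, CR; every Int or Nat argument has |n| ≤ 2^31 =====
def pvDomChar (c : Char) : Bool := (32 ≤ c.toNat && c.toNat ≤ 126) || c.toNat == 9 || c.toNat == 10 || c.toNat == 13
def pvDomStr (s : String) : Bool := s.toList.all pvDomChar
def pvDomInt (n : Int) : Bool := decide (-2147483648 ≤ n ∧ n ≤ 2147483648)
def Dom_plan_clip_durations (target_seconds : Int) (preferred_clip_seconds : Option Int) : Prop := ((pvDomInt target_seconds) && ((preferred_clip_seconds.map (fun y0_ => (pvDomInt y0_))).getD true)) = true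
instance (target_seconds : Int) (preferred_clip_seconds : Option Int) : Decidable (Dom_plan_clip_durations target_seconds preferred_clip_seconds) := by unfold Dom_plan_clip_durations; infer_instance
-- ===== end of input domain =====

-- B replaces A's O(target^2) DP table + sort of all viable plans by a purely arithmetic
-- closed form (closest feasible multiple of 4, composition from k mod 3); objective: faster.

-- ===== PORT A =====
def ALLOWED_CLIP_SECONDS : List Int := [12, 8, 4]

-- strict lexicographic '<' on the 3-tuple sort key (exact: Python compares int tuples lexicographically)
def pvLex3Lt (a b : Int × Int × Int) : Bool :=
  a.1 < b.1 || (a.1 == b.1 && (a.2.1 < b.2.1 || (a.2.1 == b.2.1 && a.2.2 < b.2.2)))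

-- the sort key of A: (abs(sum(clips) - target), len(clips), -sum(clips))
def pvKeyA (target_seconds : Int) (clips : List Int) : Int × Int × Int :=
  ((clips.sum - target_seconds).natAbs, (clips.length : Int), -clips.sum)

def plan_clip_durations (target_seconds : Int) (preferred_clip_seconds : Option Int) : List Int :=
  let allowed : List Int :=
    match preferred_clip_seconds with
    | some p =>
        if p ∈ ALLOWED_CLIP_SECONDS then p :: (ALLOWED_CLIP_SECONDS.filter (fun v => v ≠ p))
        else ALLOWED_CLIP_SECONDS
    | none => ALLOWED_CLIP_SECONDS
  -- max(ALLOWED_CLIP_SECONDS): Python max of the constant nonempty tuple (exact: list is nonempty)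
  let maxAllowed : Int := (PySem.List.max? ALLOWED_CLIP_SECONDS (fun x => x)).getD 0
  let minAllowed : Int := (PySem.List.min? ALLOWED_CLIP_SECONDS (fun x => x)).getD 0
  let max_total : Int := max (target_seconds + maxAllowed) maxAllowed
  let dp0 : PySem.Dict Int (List Int) := PySem.Dict.ofList [(0, ([] : List Int))]
  let dp : PySem.Dict Int (List Int) :=
    (PySem.List.pyRange 1 (max_total + 1) 1).foldl (fun dp total =>
      let best : Option (List Int) :=
        allowed.foldl (fun best clip_length =>
          match PySem.Dict.get? dp (total - clip_length) with
          | none => best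
          | some previous =>
              let candidate := previous ++ [clip_length]
              match best with
              | none => some candidate
              | some b =>
                  if candidate.length < b.length then some candidate
                  else if candidate.length = b.length ∧ candidate.sum > b.sum then some candidate
                  else best) none
      match best with
      | none => dp
      | some b => dp.insert total b) dp0
  let viable : List (List Int) :=
    (dp.items.filter (fun tc => decide (minAllowed ≤ tc.1) && !tc.2.isEmpty)).map (fun tc => tc.2)
  -- viable.sort(key=…): Python's stable sort = repeated stable insertion with the strict
  -- lexicographic tuple comparison (exact; cf. PySem.List.sorted_eq_foldl_insertBy)
  let sortedViable : List (List Int) :=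
    viable.foldl (fun acc c =>
      PySem.List.insertBy (fun x y => pvLex3Lt (pvKeyA target_seconds x) (pvKeyA target_seconds y)) c acc) []
  match sortedViable with
  | [] => [4]
  | h :: _ => h

-- ===== PORT B =====
def plan_clip_durations_alt (target_seconds : Int) (preferred_clip_seconds : Option Int) : List Int :=
  let total : Int :=
    if target_seconds < 4 then 4
    else
      let q := PySem.Int.floordiv target_seconds 4
      let r := PySem.Int.mod target_seconds 4
      if r < 2 then 4 * q
      else if r > 2 then 4 * (q + 1)
      else if PySem.Int.mod q 3 = 0 then 4 * q else 4 * (q + 1)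
  let k := PySem.Int.floordiv total 4
  let m := PySem.Int.floordiv (k + 2) 3
  let rem := PySem.Int.mod k 3
  if rem = 0 then List.replicate m.toNat 12
  else if rem = 2 then
    if preferred_clip_seconds = some 8 then List.replicate (m - 1).toNat 12 ++ [8]
    else 8 :: List.replicate (m - 1).toNat 12
  else if k = 1 then [4]
  else if preferred_clip_seconds = some 4 then List.replicate (m - 1).toNat 12 ++ [4]
  else if preferred_clip_seconds = some 8 then List.replicate (m - 2).toNat 12 ++ [8, 8]
  else 4 :: List.replicate (m - 1).toNat 12

-- ===== PRECONDITION & SPEC =====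
def Spec_plan_clip_durations (target_seconds : Int) (preferred_clip_seconds : Option Int) (out : List Int) : Prop := out = plan_clip_durations_alt target_seconds preferred_clip_seconds
instance (target_seconds : Int) (preferred_clip_seconds : Option Int) (out : List Int) : Decidable (Spec_plan_clip_durations target_seconds preferred_clip_seconds out) := by unfold Spec_plan_clip_durations; infer_instance

-- ===== CLAIM (what is proved, stated in full; the proofs are below) =====
def Claim_equal_plan_clip_durations : Prop := ∀ (target_seconds : Int) (preferred_clip_seconds : Option Int), Dom_plan_clip_durations target_seconds preferred_clip_seconds → Spec_plan_clip_durations target_seconds preferred_clip_seconds (plan_clip_durations target_seconds preferred_clip_seconds)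


-- ===== LEMMAS AND PROOFS =====

-- ---- closed-form composition and its statistics ----
def pvM3 (k : Nat) : Nat := (k + 2) / 3

def pvComp (p : Option Int) (k : Nat) : List Int :=
  if k % 3 = 0 then List.replicate (pvM3 k) 12
  else if k % 3 = 2 then
    if p = some 8 then List.replicate (pvM3 k - 1) 12 ++ [8]
    else 8 :: List.replicate (pvM3 k - 1) 12
  else if k = 1 then [4]
  else if p = some 4 then List.replicate (pvM3 k - 1) 12 ++ [4]
  else if p = some 8 then List.replicate (pvM3 k - 2) 12 ++ [8, 8]
  else 4 :: List.replicate (pvM3 k - 1) 12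

theorem pvComp_zero (p : Option Int) : pvComp p 0 = [] := by
  simp [pvComp, pvM3]

theorem pvComp_sum (p : Option Int) (k : Nat) : (pvComp p k).sum = 4 * (k : Int) := by
  unfold pvComp pvM3
  split_ifs with h1 h2 h3 h4 h5 h6 <;>
    simp [List.sum_replicate, smul_eq_mul] <;> push_cast <;> omega

theorem pvComp_length (p : Option Int) (k : Nat) : (pvComp p k).length = pvM3 k := by
  unfold pvComp pvM3
  split_ifs with h1 h2 h3 h4 h5 h6 <;> simp <;> omega

theorem pvComp_ne_nil (p : Option Int) (k : Nat) (hk : 1 ≤ k) : pvComp p k ≠ [] := by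
  intro h
  have := pvComp_length p k
  rw [h] at this
  simp [pvM3] at this
  omega

-- ---- the clip order A uses ----
def pvOrd (p : Option Int) : List Int :=
  if p = some 4 then [4, 12, 8] else if p = some 8 then [8, 12, 4] else [12, 8, 4]

theorem pvAllowed_eq (p : Option Int) :
    (match p with
      | some q =>
          if q ∈ ALLOWED_CLIP_SECONDS then q :: (ALLOWED_CLIP_SECONDS.filter (fun v => v ≠ q))
          else ALLOWED_CLIP_SECONDS
      | none => ALLOWED_CLIP_SECONDS) = pvOrd p := by
  match p with
  | none => simp [pvOrd, ALLOWED_CLIP_SECONDS]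
  | some q =>
    by_cases h4 : q = 4
    · subst h4; simp [pvOrd, ALLOWED_CLIP_SECONDS]
    · by_cases h8 : q = 8
      · subst h8; simp [pvOrd, ALLOWED_CLIP_SECONDS]
      · by_cases h12 : q = 12
        · subst h12; simp [pvOrd, ALLOWED_CLIP_SECONDS]
        · simp [pvOrd, ALLOWED_CLIP_SECONDS, h4, h8, h12]

-- ---- the dp table contents after processing totals 1..n ----
def pvItems (p : Option Int) (n : Nat) : List (Int × List Int) :=
  (List.range (n / 4 + 1)).map (fun j => (((4 * j : Nat) : Int), pvComp p j))

theorem pvItems_keys_nodup (p : Option Int) (n : Nat) :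
    (PySem.Dict.mk (pvItems p n)).keys.Nodup := by
  rw [PySem.Dict.keys_mk]
  unfold pvItems
  rw [List.map_map]
  apply List.Nodup.map
  · intro a b hab
    simp only [Function.comp] at hab
    push_cast at hab
    omega
  · exact List.nodup_range

theorem pvGet_some (p : Option Int) (n j : Nat) (hj : j ≤ n / 4) :
    (PySem.Dict.mk (pvItems p n)).get? ((4 * j : Nat) : Int) = some (pvComp p j) := by
  have hmem : (((4 * j : Nat) : Int), pvComp p j) ∈ (PySem.Dict.mk (pvItems p n)).items := by
    show _ ∈ pvItems p n
    unfold pvItems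
    exact List.mem_map_of_mem (List.mem_range.mpr (by omega))
  exact PySem.Dict.get?_of_mem_items _ hmem (pvItems_keys_nodup p n)

theorem pvGet_none (p : Option Int) (n : Nat) (x : Int)
    (hx : ∀ j : Nat, j ≤ n / 4 → x ≠ ((4 * j : Nat) : Int)) :
    (PySem.Dict.mk (pvItems p n)).get? x = none := by
  cases h : (PySem.Dict.mk (pvItems p n)).get? x with
  | none => rfl
  | some v =>
    exfalso
    have hmem := (PySem.Dict.get?_eq_some_iff_mem_items _ x v (pvItems_keys_nodup p n)).mp h
    have hmem' : (x, v) ∈ pvItems p n := hmem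
    unfold pvItems at hmem'
    simp only [List.mem_map, List.mem_range] at hmem'
    obtain ⟨j, hj, hjx⟩ := hmem'
    exact hx j (by omega) (by exact_mod_cast congrArg Prod.fst hjx.symm)

-- ---- the loop body, abstracted over the clip order ----
def pvBest (o : List Int) (dp : PySem.Dict Int (List Int)) (total : Int) : Option (List Int) :=
  o.foldl (fun best clip_length =>
    match PySem.Dict.get? dp (total - clip_length) with
    | none => best
    | some previous =>
        let candidate := previous ++ [clip_length]
        match best with
        | none => some candidate
        | some b =>
            if candidate.length < b.length then some candidate
            else if candidate.length = b.length ∧ candidate.sum > b.sum then some candidate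
            else best) none

def pvBody (o : List Int) (dp : PySem.Dict Int (List Int)) (total : Int) : PySem.Dict Int (List Int) :=
  match pvBest o dp total with
  | none => dp
  | some b => dp.insert total b

-- branch unfoldings of pvComp
theorem pvComp_one (p : Option Int) : pvComp p 1 = [4] := by
  norm_num [pvComp, pvM3]

theorem pvComp_two (p : Option Int) : pvComp p 2 = [8] := by
  rcases p with _ | q
  · rfl
  · by_cases h : q = 8
    · subst h; rfl
    · simp [pvComp, pvM3, h]

theorem pvComp_three (p : Option Int) : pvComp p 3 = [12] := by
  norm_num [pvComp, pvM3]

theorem pvComp_mod0 (p : Option Int) (k : Nat) (h : k % 3 = 0) :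
    pvComp p k = List.replicate (pvM3 k) 12 := by
  simp [pvComp, h]

theorem pvComp_mod2_p8 (k : Nat) (h : k % 3 = 2) :
    pvComp (some 8) k = List.replicate (pvM3 k - 1) 12 ++ [8] := by
  have h0 : ¬ (k % 3 = 0) := by omega
  simp [pvComp, h, h0]

theorem pvComp_mod2_np8 (p : Option Int) (k : Nat) (h : k % 3 = 2) (hp : p ≠ some 8) :
    pvComp p k = 8 :: List.replicate (pvM3 k - 1) 12 := by
  have h0 : ¬ (k % 3 = 0) := by omega
  simp [pvComp, h, h0, hp]

theorem pvComp_mod1_p4 (k : Nat) (h : k % 3 = 1) :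
    pvComp (some 4) k = List.replicate (pvM3 k - 1) 12 ++ [4] := by
  have h0 : ¬ (k % 3 = 0) := by omega
  have h2 : ¬ (k % 3 = 2) := by omega
  by_cases hk1 : k = 1
  · subst hk1; rfl
  · simp [pvComp, h0, h2, hk1]

theorem pvComp_mod1_p8 (k : Nat) (h : k % 3 = 1) (hk1 : k ≠ 1) :
    pvComp (some 8) k = List.replicate (pvM3 k - 2) 12 ++ [8, 8] := by
  have h0 : ¬ (k % 3 = 0) := by omega
  have h2 : ¬ (k % 3 = 2) := by omega
  simp [pvComp, h0, h2, hk1]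

theorem pvComp_mod1_else (p : Option Int) (k : Nat) (h : k % 3 = 1)
    (hp4 : p ≠ some 4) (hp8 : p ≠ some 8) :
    pvComp p k = 4 :: List.replicate (pvM3 k - 1) 12 := by
  have h0 : ¬ (k % 3 = 0) := by omega
  have h2 : ¬ (k % 3 = 2) := by omega
  by_cases hk1 : k = 1
  · subst hk1; norm_num [pvComp, pvM3, hp4, hp8]
  · simp [pvComp, h0, h2, hk1, hp4, hp8]

def pvStep (total : Int) (best : Option (List Int)) (prevOpt : Option (List Int)) (clip_length : Int) : Option (List Int) :=
  match prevOpt with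
  | none => best
  | some previous =>
      let candidate := previous ++ [clip_length]
      match best with
      | none => some candidate
      | some b =>
          if candidate.length < b.length then some candidate
          else if candidate.length = b.length ∧ candidate.sum > b.sum then some candidate
          else best

theorem pvBest_three (d : PySem.Dict Int (List Int)) (T c1 c2 c3 : Int) :
    pvBest [c1, c2, c3] d T =
      pvStep T (pvStep T (pvStep T none (d.get? (T - c1)) c1) (d.get? (T - c2)) c2) (d.get? (T - c3)) c3 := rfl

theorem pvStep_start (T : Int) (prev : List Int) (c : Int) :
    pvStep T none (some prev) c = some (prev ++ [c]) := rfl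

theorem pvStep_keep (T : Int) (b prev : List Int) (c : Int)
    (h1 : ¬ ((prev ++ [c]).length < b.length))
    (h2 : ¬ ((prev ++ [c]).length = b.length ∧ (prev ++ [c]).sum > b.sum)) :
    pvStep T (some b) (some prev) c = some b := by
  simp only [pvStep, if_neg h1, if_neg h2]

theorem pvStep_repl (T : Int) (b prev : List Int) (c : Int)
    (h1 : (prev ++ [c]).length < b.length) :
    pvStep T (some b) (some prev) c = some (prev ++ [c]) := by
  simp only [pvStep, if_pos h1]

theorem pvLenApp (p : Option Int) (k : Nat) (c : Int) :
    (pvComp p k ++ [c]).length = pvM3 k + 1 := by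
  simp [pvComp_length]

theorem pvSumApp (p : Option Int) (k : Nat) (c : Int) :
    (pvComp p k ++ [c]).sum = 4 * (k : Int) + c := by
  simp [pvComp_sum]

theorem pvBestD_big (p : Option Int) (k : Nat) (hk4 : 4 ≤ k)
    (hp4 : p ≠ some 4) (hp8 : p ≠ some 8) (d : PySem.Dict Int (List Int))
    (h4 : d.get? (4 * (k : Int) - 4) = some (pvComp p (k - 1)))
    (h8 : d.get? (4 * (k : Int) - 8) = some (pvComp p (k - 2)))
    (h12 : d.get? (4 * (k : Int) - 12) = some (pvComp p (k - 3))) :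
    pvBest [12, 8, 4] d (4 * (k : Int)) = some (pvComp p k) := by
  obtain ⟨j, rfl⟩ : ∃ j, k = j + 4 := ⟨k - 4, by omega⟩
  have e1 : j + 4 - 1 = j + 3 := rfl
  have e2 : j + 4 - 2 = j + 2 := rfl
  have e3 : j + 4 - 3 = j + 1 := rfl
  rw [e1] at h4; rw [e2] at h8; rw [e3] at h12
  rw [pvBest_three, h4, h8, h12, pvStep_start]
  rw [pvStep_keep _ _ _ _
    (by rw [pvLenApp, pvLenApp]; unfold pvM3; omega)
    (by rw [pvLenApp, pvSumApp, pvLenApp, pvSumApp]; push_cast; omega)]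
  rw [pvStep_keep _ _ _ _
    (by rw [pvLenApp, pvLenApp]; unfold pvM3; omega)
    (by rw [pvLenApp, pvSumApp, pvLenApp, pvSumApp]; push_cast; omega)]
  congr 1
  have hm3 : (j + 4) % 3 = (j + 1) % 3 := by omega
  rcases h : (j + 1) % 3 with _ | n
  · -- k ≡ 0 [3]
    rw [pvComp_mod0 p (j+1) h, pvComp_mod0 p (j+4) (by omega)]
    rw [← List.replicate_succ']
    congr 1
    unfold pvM3; omega
  · rcases n with _ | n
    · -- k ≡ 1 [3]
      rw [pvComp_mod1_else p (j+1) h hp4 hp8, pvComp_mod1_else p (j+4) (by omega) hp4 hp8]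
      rw [List.cons_append, ← List.replicate_succ']
      congr 2
      unfold pvM3; omega
    · -- k ≡ 2 [3]
      have h2 : (j + 1) % 3 = 2 := by omega
      rw [pvComp_mod2_np8 p (j+1) h2 hp8, pvComp_mod2_np8 p (j+4) (by omega) hp8]
      rw [List.cons_append, ← List.replicate_succ']
      congr 2
      unfold pvM3; omega

theorem pvBestP4_big (k : Nat) (hk4 : 4 ≤ k) (d : PySem.Dict Int (List Int))
    (h4 : d.get? (4 * (k : Int) - 4) = some (pvComp (some 4) (k - 1)))
    (h8 : d.get? (4 * (k : Int) - 8) = some (pvComp (some 4) (k - 2)))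
    (h12 : d.get? (4 * (k : Int) - 12) = some (pvComp (some 4) (k - 3))) :
    pvBest [4, 12, 8] d (4 * (k : Int)) = some (pvComp (some 4) k) := by
  obtain ⟨j, rfl⟩ : ∃ j, k = j + 4 := ⟨k - 4, by omega⟩
  rw [show j + 4 - 1 = j + 3 from rfl] at h4
  rw [show j + 4 - 2 = j + 2 from rfl] at h8
  rw [show j + 4 - 3 = j + 1 from rfl] at h12
  rw [pvBest_three, h4, h8, h12, pvStep_start]
  by_cases hj : j % 3 = 0
  · -- k ≡ 1 [3]: keep the 4-candidate throughout
    rw [pvStep_keep _ _ _ _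
      (by rw [pvLenApp, pvLenApp]; unfold pvM3; omega)
      (by rw [pvLenApp, pvSumApp, pvLenApp, pvSumApp]; push_cast; omega)]
    rw [pvStep_keep _ _ _ _
      (by rw [pvLenApp, pvLenApp]; unfold pvM3; omega)
      (by rw [pvLenApp, pvSumApp, pvLenApp, pvSumApp]; push_cast; omega)]
    congr 1
    rw [pvComp_mod0 (some 4) (j+3) (by omega), pvComp_mod1_p4 (j+4) (by omega)]
    congr 2
    unfold pvM3; omega
  · -- k ≡ 0 or 2 [3]: the 12-candidate is strictly shorter
    rw [pvStep_repl _ _ _ _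
      (by rw [pvLenApp, pvLenApp]; unfold pvM3; omega)]
    rw [pvStep_keep _ _ _ _
      (by rw [pvLenApp, pvLenApp]; unfold pvM3; omega)
      (by rw [pvLenApp, pvSumApp, pvLenApp, pvSumApp]; push_cast; omega)]
    congr 1
    by_cases hj2 : j % 3 = 2
    · -- k ≡ 0 [3]
      rw [pvComp_mod0 (some 4) (j+1) (by omega), pvComp_mod0 (some 4) (j+4) (by omega)]
      rw [← List.replicate_succ']
      congr 1
      unfold pvM3; omega
    · -- k ≡ 2 [3]
      rw [pvComp_mod2_np8 (some 4) (j+1) (by omega) (by simp),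
          pvComp_mod2_np8 (some 4) (j+4) (by omega) (by simp)]
      rw [List.cons_append, ← List.replicate_succ']
      congr 2
      unfold pvM3; omega

theorem pvBestP8_big (k : Nat) (hk4 : 4 ≤ k) (d : PySem.Dict Int (List Int))
    (h4 : d.get? (4 * (k : Int) - 4) = some (pvComp (some 8) (k - 1)))
    (h8 : d.get? (4 * (k : Int) - 8) = some (pvComp (some 8) (k - 2)))
    (h12 : d.get? (4 * (k : Int) - 12) = some (pvComp (some 8) (k - 3))) :
    pvBest [8, 12, 4] d (4 * (k : Int)) = some (pvComp (some 8) k) := by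
  obtain ⟨j, rfl⟩ : ∃ j, k = j + 4 := ⟨k - 4, by omega⟩
  rw [show j + 4 - 1 = j + 3 from rfl] at h4
  rw [show j + 4 - 2 = j + 2 from rfl] at h8
  rw [show j + 4 - 3 = j + 1 from rfl] at h12
  rw [pvBest_three, h8, h12, h4, pvStep_start]
  by_cases hj : j % 3 = 2
  · -- k ≡ 0 [3]: the 12-candidate is strictly shorter
    rw [pvStep_repl _ _ _ _
      (by rw [pvLenApp, pvLenApp]; unfold pvM3; omega)]
    rw [pvStep_keep _ _ _ _
      (by rw [pvLenApp, pvLenApp]; unfold pvM3; omega)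
      (by rw [pvLenApp, pvSumApp, pvLenApp, pvSumApp]; push_cast; omega)]
    congr 1
    rw [pvComp_mod0 (some 8) (j+1) (by omega), pvComp_mod0 (some 8) (j+4) (by omega)]
    rw [← List.replicate_succ']
    congr 1
    unfold pvM3; omega
  · -- k ≡ 1 or 2 [3]: keep the 8-candidate throughout
    rw [pvStep_keep _ _ _ _
      (by rw [pvLenApp, pvLenApp]; unfold pvM3; omega)
      (by rw [pvLenApp, pvSumApp, pvLenApp, pvSumApp]; push_cast; omega)]
    rw [pvStep_keep _ _ _ _
      (by rw [pvLenApp, pvLenApp]; unfold pvM3; omega)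
      (by rw [pvLenApp, pvSumApp, pvLenApp, pvSumApp]; push_cast; omega)]
    congr 1
    by_cases hj0 : j % 3 = 0
    · -- k ≡ 1 [3]
      rw [pvComp_mod2_p8 (j+2) (by omega), pvComp_mod1_p8 (j+4) (by omega) (by omega)]
      rw [List.append_assoc]
      congr 2
      unfold pvM3; omega
    · -- k ≡ 2 [3]
      rw [pvComp_mod0 (some 8) (j+2) (by omega), pvComp_mod2_p8 (j+4) (by omega)]
      congr 2
      unfold pvM3; omega

-- evaluation of the inner fold at a reachable total 4k
theorem pvBest_eval (p : Option Int) (k : Nat) (hk : 1 ≤ k) (d : PySem.Dict Int (List Int))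
    (h4 : d.get? (4 * (k : Int) - 4) = some (pvComp p (k - 1)))
    (h8 : d.get? (4 * (k : Int) - 8) = (if 2 ≤ k then some (pvComp p (k - 2)) else none))
    (h12 : d.get? (4 * (k : Int) - 12) = (if 3 ≤ k then some (pvComp p (k - 3)) else none)) :
    pvBest (pvOrd p) d (4 * (k : Int)) = some (pvComp p k) := by
  by_cases hk1 : k = 1
  · subst hk1
    rw [if_neg (by omega)] at h8
    rw [if_neg (by omega)] at h12
    norm_num at h4 h8 h12
    rcases p with _ | q
    · rw [show pvOrd none = [12, 8, 4] from rfl, pvBest_three]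
      norm_num
      rw [h4, h8, h12]
      simp [pvStep, pvComp_zero, pvComp_one, pvComp_two, pvComp_three]
    · by_cases hq4 : q = 4
      · subst hq4
        rw [show pvOrd (some 4) = [4, 12, 8] from rfl, pvBest_three]
        norm_num
        rw [h4, h8, h12]
        simp [pvStep, pvComp_zero, pvComp_one, pvComp_two, pvComp_three]
      · by_cases hq8 : q = 8
        · subst hq8
          rw [show pvOrd (some 8) = [8, 12, 4] from rfl, pvBest_three]
          norm_num
          rw [h4, h8, h12]
          simp [pvStep, pvComp_zero, pvComp_one, pvComp_two, pvComp_three]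
        · rw [show pvOrd (some q) = [12, 8, 4] from (by simp [pvOrd, hq4, hq8]), pvBest_three]
          norm_num
          rw [h4, h8, h12]
          simp [pvStep, pvComp_zero, pvComp_one, pvComp_two, pvComp_three]
  by_cases hk2 : k = 2
  · subst hk2
    rw [if_pos (by omega)] at h8
    rw [if_neg (by omega)] at h12
    norm_num at h4 h8 h12
    rcases p with _ | q
    · rw [show pvOrd none = [12, 8, 4] from rfl, pvBest_three]
      norm_num
      rw [h4, h8, h12]
      simp [pvStep, pvComp_zero, pvComp_one, pvComp_two, pvComp_three]
    · by_cases hq4 : q = 4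
      · subst hq4
        rw [show pvOrd (some 4) = [4, 12, 8] from rfl, pvBest_three]
        norm_num
        rw [h4, h8, h12]
        simp [pvStep, pvComp_zero, pvComp_one, pvComp_two, pvComp_three]
      · by_cases hq8 : q = 8
        · subst hq8
          rw [show pvOrd (some 8) = [8, 12, 4] from rfl, pvBest_three]
          norm_num
          rw [h4, h8, h12]
          simp [pvStep, pvComp_zero, pvComp_one, pvComp_two, pvComp_three]
        · rw [show pvOrd (some q) = [12, 8, 4] from (by simp [pvOrd, hq4, hq8]), pvBest_three]
          norm_num
          rw [h4, h8, h12]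
          simp [pvStep, pvComp_zero, pvComp_one, pvComp_two, pvComp_three]
  by_cases hk3 : k = 3
  · subst hk3
    rw [if_pos (by omega)] at h8
    rw [if_pos (by omega)] at h12
    norm_num at h4 h8 h12
    rcases p with _ | q
    · rw [show pvOrd none = [12, 8, 4] from rfl, pvBest_three]
      norm_num
      rw [h4, h8, h12]
      simp [pvStep, pvComp_zero, pvComp_one, pvComp_two, pvComp_three]
    · by_cases hq4 : q = 4
      · subst hq4
        rw [show pvOrd (some 4) = [4, 12, 8] from rfl, pvBest_three]
        norm_num
        rw [h4, h8, h12]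
        simp [pvStep, pvComp_zero, pvComp_one, pvComp_two, pvComp_three]
      · by_cases hq8 : q = 8
        · subst hq8
          rw [show pvOrd (some 8) = [8, 12, 4] from rfl, pvBest_three]
          norm_num
          rw [h4, h8, h12]
          simp [pvStep, pvComp_zero, pvComp_one, pvComp_two, pvComp_three]
        · rw [show pvOrd (some q) = [12, 8, 4] from (by simp [pvOrd, hq4, hq8]), pvBest_three]
          norm_num
          rw [h4, h8, h12]
          simp [pvStep, pvComp_zero, pvComp_one, pvComp_two, pvComp_three]
  -- k ≥ 4
  have hk4 : 4 ≤ k := by omega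
  rw [if_pos (by omega)] at h8
  rw [if_pos (by omega)] at h12
  rcases p with _ | q
  · rw [show pvOrd none = [12, 8, 4] from rfl]
    exact pvBestD_big none k hk4 (by simp) (by simp) d h4 h8 h12
  · by_cases hq4 : q = 4
    · subst hq4
      rw [show pvOrd (some 4) = [4, 12, 8] from rfl]
      exact pvBestP4_big k hk4 d h4 h8 h12
    · by_cases hq8 : q = 8
      · subst hq8
        rw [show pvOrd (some 8) = [8, 12, 4] from rfl]
        exact pvBestP8_big k hk4 d h4 h8 h12
      · rw [show pvOrd (some q) = [12, 8, 4] from (by simp [pvOrd, hq4, hq8])]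
        exact pvBestD_big (some q) k hk4 (by simp [hq4]) (by simp [hq8]) d h4 h8 h12

-- ---- the dp loop ----
theorem pvBest_none (o : List Int) (d : PySem.Dict Int (List Int)) (T : Int)
    (h : ∀ c ∈ o, d.get? (T - c) = none) : pvBest o d T = none := by
  unfold pvBest
  induction o with
  | nil => rfl
  | cons c o' ih =>
    rw [List.foldl_cons]
    have hc := h c (List.mem_cons_self ..)
    rw [hc]
    exact ih (fun c' hc' => h c' (List.mem_cons_of_mem _ hc'))

theorem pvMem_ord (p : Option Int) (c : Int) (hc : c ∈ pvOrd p) : c = 4 ∨ c = 8 ∨ c = 12 := by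
  unfold pvOrd at hc
  split_ifs at hc <;> simp at hc <;> tauto

theorem pvItems_succ (p : Option Int) (n k : Nat) (hk : n + 1 = 4 * k) (hk1 : 1 ≤ k) :
    pvItems p (n + 1) = pvItems p n ++ [((4 * (k : Int)), pvComp p k)] := by
  unfold pvItems
  rw [show (n + 1) / 4 + 1 = (n / 4 + 1) + 1 by omega, List.range_succ, List.map_append]
  congr 1
  rw [show n / 4 + 1 = k by omega]
  simp only [List.map_cons, List.map_nil]
  push_cast
  rfl

theorem pvStepDict (p : Option Int) (n : Nat) :
    pvBody (pvOrd p) (PySem.Dict.mk (pvItems p n)) ((n : Int) + 1) = PySem.Dict.mk (pvItems p (n + 1)) := by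
  by_cases hdiv : (n + 1) % 4 = 0
  · -- a reachable total 4k is added
    obtain ⟨k, hk⟩ : ∃ k : Nat, n + 1 = 4 * k := ⟨(n + 1) / 4, by omega⟩
    have hk1 : 1 ≤ k := by omega
    have hnd : n / 4 = k - 1 := by omega
    have hT : ((n : Int) + 1) = 4 * (k : Int) := by push_cast; omega
    have h4 : (PySem.Dict.mk (pvItems p n)).get? (4 * (k : Int) - 4) = some (pvComp p (k - 1)) := by
      have := pvGet_some p n (k - 1) (by omega)
      rwa [show ((4 * (k - 1) : Nat) : Int) = 4 * (k : Int) - 4 by push_cast; omega] at this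
    have h8 : (PySem.Dict.mk (pvItems p n)).get? (4 * (k : Int) - 8) =
        (if 2 ≤ k then some (pvComp p (k - 2)) else none) := by
      by_cases h2 : 2 ≤ k
      · rw [if_pos h2]
        have := pvGet_some p n (k - 2) (by omega)
        rwa [show ((4 * (k - 2) : Nat) : Int) = 4 * (k : Int) - 8 by push_cast; omega] at this
      · rw [if_neg h2]
        exact pvGet_none p n _ (fun j hj => by push_cast; omega)
    have h12 : (PySem.Dict.mk (pvItems p n)).get? (4 * (k : Int) - 12) =
        (if 3 ≤ k then some (pvComp p (k - 3)) else none) := by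
      by_cases h3 : 3 ≤ k
      · rw [if_pos h3]
        have := pvGet_some p n (k - 3) (by omega)
        rwa [show ((4 * (k - 3) : Nat) : Int) = 4 * (k : Int) - 12 by push_cast; omega] at this
      · rw [if_neg h3]
        exact pvGet_none p n _ (fun j hj => by push_cast; omega)
    unfold pvBody
    rw [hT, pvBest_eval p k hk1 _ h4 h8 h12]
    have hfresh : (PySem.Dict.mk (pvItems p n)).contains (4 * (k : Int)) = false := by
      rw [PySem.Dict.contains_mk]
      rw [List.any_eq_false]
      intro q hq
      unfold pvItems at hq
      simp only [List.mem_map, List.mem_range] at hq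
      obtain ⟨j, hj, rfl⟩ := hq
      simp only [beq_iff_eq]
      push_cast
      omega
    have hins := PySem.Dict.items_foldl_insert_fresh [()] (fun _ => 4 * (k : Int)) (fun _ => pvComp p k)
      (PySem.Dict.mk (pvItems p n)) (by simpa using hfresh) (by simp)
    simp only [List.foldl_cons, List.foldl_nil, List.map_cons, List.map_nil] at hins
    apply PySem.Dict.ext
    rw [hins, pvItems_succ p n k hk hk1]
  · -- an unreachable total: the dict is unchanged
    have hbest : pvBest (pvOrd p) (PySem.Dict.mk (pvItems p n)) ((n : Int) + 1) = none := by
      apply pvBest_none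
      intro c hc
      apply pvGet_none
      intro j hj
      rcases pvMem_ord p c hc with rfl | rfl | rfl <;> push_cast <;> omega
    unfold pvBody
    rw [hbest]
    congr 1
    unfold pvItems
    rw [show (n + 1) / 4 = n / 4 by omega]

theorem pvLoop (p : Option Int) (n : Nat) :
    (PySem.List.pyRange 1 ((n : Int) + 1) 1).foldl (pvBody (pvOrd p))
      (PySem.Dict.ofList [(0, ([] : List Int))]) = PySem.Dict.mk (pvItems p n) := by
  induction n with
  | zero =>
    rw [PySem.List.pyRange_one_eq_nil (by norm_num)]
    rfl
  | succ m ih =>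
    push_cast
    rw [PySem.List.pyRange_one_succ_right (by omega), List.foldl_append, List.foldl_cons,
      List.foldl_nil, ih]
    exact pvStepDict p m

-- ---- the viable list ----
theorem pvViable (p : Option Int) (n : Nat) :
    ((pvItems p n).filter (fun tc => decide ((4 : Int) ≤ tc.1) && !tc.2.isEmpty)).map (fun tc => tc.2)
      = (List.range (n / 4)).map (fun i => pvComp p (i + 1)) := by
  unfold pvItems
  rw [List.filter_map, List.range_succ_eq_map]
  rw [List.filter_cons_of_neg (by norm_num)]
  rw [List.filter_map, List.filter_eq_self.mpr (by
    intro a _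
    simp only [Function.comp_apply, Bool.and_eq_true, decide_eq_true_eq, Bool.not_eq_eq_eq_not,
      Bool.not_true, List.isEmpty_eq_false_iff]
    constructor
    · push_cast; omega
    · exact pvComp_ne_nil p (a + 1) (by omega))]
  simp [List.map_map, Function.comp_def, Nat.succ_eq_add_one]

-- ---- the stable insertion sort: head minimality ----
theorem pvLexLt_irrefl (a : Int × Int × Int) : pvLex3Lt a a = false := by
  simp [pvLex3Lt]

theorem pvLexLt_trans (a b c : Int × Int × Int) (h1 : pvLex3Lt a b = true) (h2 : pvLex3Lt b c = true) :
    pvLex3Lt a c = true := by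
  simp only [pvLex3Lt, Bool.or_eq_true, Bool.and_eq_true, decide_eq_true_eq, beq_iff_eq] at *
  omega

theorem pvInsertBy_ne_nil {α : Type} (b : α → α → Bool) (x : α) (ys : List α) :
    PySem.List.insertBy b x ys ≠ [] := by
  cases ys with
  | nil => simp [PySem.List.insertBy]
  | cons y ys' =>
    simp only [PySem.List.insertBy]
    split <;> simp

theorem pvFoldl_insertBy_ne_nil {α : Type} (b : α → α → Bool) (l : List α) (acc : List α)
    (h : acc ≠ [] ∨ l ≠ []) : l.foldl (fun a x => PySem.List.insertBy b x a) acc ≠ [] := by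
  induction l generalizing acc with
  | nil => simpa using h
  | cons x l' ih => exact ih _ (Or.inl (pvInsertBy_ne_nil b x acc))

theorem pvFoldl_insertBy_mem {α : Type} (b : α → α → Bool) (l : List α) (acc : List α) (y : α) :
    y ∈ l.foldl (fun a x => PySem.List.insertBy b x a) acc ↔ y ∈ acc ∨ y ∈ l := by
  induction l generalizing acc with
  | nil => simp
  | cons x l' ih =>
    rw [List.foldl_cons, ih, PySem.List.mem_insertBy]
    simp
    tauto

-- the head of the accumulator of an insertBy loop is minimal w.r.t. the (transitive,
-- irreflexive) comparison; stated for the lex comparison composed with a key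
theorem pvInsertBy_headmin {α : Type} (key : α → Int × Int × Int) (x : α) (acc : List α)
    (hacc : ∀ h t, acc = h :: t → ∀ y ∈ acc, pvLex3Lt (key y) (key h) = false) :
    ∀ h t, PySem.List.insertBy (fun u v => pvLex3Lt (key u) (key v)) x acc = h :: t →
      ∀ y ∈ PySem.List.insertBy (fun u v => pvLex3Lt (key u) (key v)) x acc,
        pvLex3Lt (key y) (key h) = false := by
  cases acc with
  | nil =>
    intro h t heq y hy
    simp only [PySem.List.insertBy] at heq hy
    cases heq
    simp at hy
    subst hy
    exact pvLexLt_irrefl _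
  | cons a as =>
    intro h t heq y hy
    simp only [PySem.List.insertBy] at heq hy
    by_cases hcmp : pvLex3Lt (key x) (key a) = true
    · rw [if_pos hcmp] at heq hy
      cases heq
      rw [List.mem_cons] at hy
      rcases hy with hy | hy
      · subst hy; exact pvLexLt_irrefl _
      · by_cases hlt : pvLex3Lt (key y) (key x) = true
        · have := pvLexLt_trans _ _ _ hlt hcmp
          have hfalse := hacc a as rfl y hy
          rw [this] at hfalse
          cases hfalse
        · simpa using hlt
    · rw [if_neg hcmp] at heq hy
      cases heq
      rw [List.mem_cons] at hy
      rcases hy with hy | hy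
      · subst hy; exact pvLexLt_irrefl _
      · rw [PySem.List.mem_insertBy] at hy
        rcases hy with rfl | hy
        · simpa using hcmp
        · exact hacc a as rfl y (List.mem_cons_of_mem _ hy)

theorem pvFoldl_insertBy_headmin {α : Type} (key : α → Int × Int × Int) (l : List α) (acc : List α)
    (hacc : ∀ h t, acc = h :: t → ∀ y ∈ acc, pvLex3Lt (key y) (key h) = false) :
    ∀ h t, l.foldl (fun a x => PySem.List.insertBy (fun u v => pvLex3Lt (key u) (key v)) x a) acc = h :: t →
      ∀ y ∈ l.foldl (fun a x => PySem.List.insertBy (fun u v => pvLex3Lt (key u) (key v)) x a) acc,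
        pvLex3Lt (key y) (key h) = false := by
  induction l generalizing acc with
  | nil => exact hacc
  | cons x l' ih =>
    rw [List.foldl_cons]
    exact ih _ (pvInsertBy_headmin key x acc hacc)

-- ---- B's chosen number of 4-second units, and its optimality ----
def pvKStar (t : Int) : Nat :=
  if t < 4 then 1
  else if t.toNat % 4 < 2 then t.toNat / 4
  else if t.toNat % 4 > 2 then t.toNat / 4 + 1
  else if (t.toNat / 4) % 3 = 0 then t.toNat / 4 else t.toNat / 4 + 1

theorem pvKStar_pos (t : Int) : 1 ≤ pvKStar t := by
  unfold pvKStar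
  split_ifs <;> omega

theorem pvKStar_le (t : Int) : 4 * (pvKStar t : Int) ≤ max (t + 12) 12 := by
  have ha : t + 12 ≤ max (t + 12) 12 := le_max_left _ _
  have hb : (12 : Int) ≤ max (t + 12) 12 := le_max_right _ _
  unfold pvKStar
  split_ifs <;> push_cast <;> omega

def pvKey (t : Int) (j : Nat) : Int × Int × Int :=
  (((4 * (j : Int) - t).natAbs : Int), ((pvM3 j : Nat) : Int), -(4 * (j : Int)))

theorem pvKeyA_comp (t : Int) (p : Option Int) (j : Nat) :
    pvKeyA t (pvComp p j) = pvKey t j := by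
  unfold pvKeyA pvKey
  rw [pvComp_sum, pvComp_length]

theorem pvKey_min (t : Int) (j : Nat) (hj : 1 ≤ j) (hne : j ≠ pvKStar t) :
    pvLex3Lt (pvKey t (pvKStar t)) (pvKey t j) = true := by
  simp only [pvLex3Lt, pvKey, pvM3, Bool.or_eq_true, Bool.and_eq_true, decide_eq_true_eq, beq_iff_eq]
  unfold pvKStar at hne ⊢
  split_ifs at hne ⊢ <;> omega

-- B's port returns the closed form at pvKStar
theorem pvAlt_eq (t : Int) (p : Option Int) :
    plan_clip_durations_alt t p = pvComp p (pvKStar t) := by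
  unfold plan_clip_durations_alt
  simp only [PySem.Int.floordiv, PySem.Int.mod]
  have hfd : ∀ a : Int, 0 ≤ a → ∀ b : Int, 0 < b → a.fdiv b = a / b := by
    intro a ha b hb
    rw [Int.fdiv_eq_ediv]
    simp [Int.le_of_lt hb]
  by_cases ht : t < 4
  · rw [if_pos ht]
    have hks : pvKStar t = 1 := by unfold pvKStar; rw [if_pos ht]
    rw [hks, pvComp_one]
    norm_num [show Int.fmod 1 3 = 1 from by decide]
  · rw [if_neg ht]
    set q : Int := t.fdiv 4 with hq
    set r : Int := t.fmod 4 with hr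
    have hqv : q = (t.toNat / 4 : Nat) := by
      rw [hq, hfd t (by omega) 4 (by norm_num)]
      omega
    have hrv : r = (t.toNat % 4 : Nat) := by
      rw [hr, Int.fmod_eq_emod]
      simp only [show (0:Int) ≤ 4 ∨ (4:Int) ∣ t ↔ True from by norm_num, if_pos trivial]
      push_cast
      omega
    -- the selected total is 4 * pvKStar t in every branch
    have htot : (if r < 2 then 4 * q else if r > 2 then 4 * (q + 1)
        else if q.fmod 3 = 0 then 4 * q else 4 * (q + 1)) = 4 * ((pvKStar t : Nat) : Int) := by
      have hq3 : q.fmod 3 = (t.toNat / 4 % 3 : Nat) := by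
        rw [hqv, Int.fmod_eq_emod]
        simp only [show (0:Int) ≤ 3 ∨ (3:Int) ∣ ((t.toNat / 4 : Nat) : Int) ↔ True from by norm_num,
          if_pos trivial]
        push_cast
        omega
      unfold pvKStar
      rw [if_neg ht, hq3]
      split_ifs <;> push_cast <;> omega
    rw [htot]
    set k : Nat := pvKStar t with hk
    have hk1 : 1 ≤ k := pvKStar_pos t
    have hkd : (4 * ((k : Nat) : Int)).fdiv 4 = (k : Int) := by
      rw [hfd _ (by positivity) 4 (by norm_num)]
      omega
    rw [hkd]
    have hm : ((k : Int) + 2).fdiv 3 = ((pvM3 k : Nat) : Int) := by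
      rw [hfd _ (by positivity) 3 (by norm_num)]
      unfold pvM3
      push_cast
      omega
    have hrem : (k : Int).fmod 3 = ((k % 3 : Nat) : Int) := by
      rw [Int.fmod_eq_emod]
      simp only [show (0:Int) ≤ 3 ∨ (3:Int) ∣ (k : Int) ↔ True from by norm_num, if_pos trivial]
      push_cast
      omega
    rw [hm, hrem]
    have hm0 : (((pvM3 k : Nat) : Int)).toNat = pvM3 k := by omega
    have hm1 : (((pvM3 k : Nat) : Int) - 1).toNat = pvM3 k - 1 := by omega
    have hm2 : (((pvM3 k : Nat) : Int) - 2).toNat = pvM3 k - 2 := by omega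
    have hc0 : ((((k % 3 : Nat) : Nat) : Int) = 0) ↔ k % 3 = 0 := by omega
    have hc2 : ((((k % 3 : Nat) : Nat) : Int) = 2) ↔ k % 3 = 2 := by omega
    have hck1 : ((k : Int) = 1) ↔ k = 1 := by omega
    unfold pvComp
    by_cases h0 : k % 3 = 0
    · rw [if_pos (hc0.mpr h0), if_pos h0, hm0]
    · rw [if_neg (fun h => h0 (hc0.mp h)), if_neg h0]
      by_cases h2 : k % 3 = 2
      · rw [if_pos (hc2.mpr h2), if_pos h2]
        by_cases hp8 : p = some 8
        · rw [if_pos hp8, if_pos hp8, hm1]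
        · rw [if_neg hp8, if_neg hp8, hm1]
      · rw [if_neg (fun h => h2 (hc2.mp h)), if_neg h2]
        by_cases hk1' : k = 1
        · rw [if_pos (hck1.mpr hk1'), if_pos hk1']
        · rw [if_neg (fun h => hk1' (hck1.mp h)), if_neg hk1']
          by_cases hp4 : p = some 4
          · rw [if_pos hp4, if_pos hp4, hm1]
          · rw [if_neg hp4, if_neg hp4]
            by_cases hp8 : p = some 8
            · rw [if_pos hp8, if_pos hp8, hm2]
            · rw [if_neg hp8, if_neg hp8, hm1]

-- A's whole pipeline, written with the named components
theorem pvA_eq (t : Int) (p : Option Int) :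
    plan_clip_durations t p =
      (match ((((PySem.List.pyRange 1 (max (t + 12) 12 + 1) 1).foldl (pvBody (pvOrd p))
          (PySem.Dict.ofList [(0, ([] : List Int))])).items.filter
            (fun tc => decide ((4 : Int) ≤ tc.1) && !tc.2.isEmpty)).map (fun tc => tc.2)).foldl
          (fun acc c => PySem.List.insertBy (fun x y => pvLex3Lt (pvKeyA t x) (pvKeyA t y)) c acc) [] with
        | [] => [4]
        | h :: _ => h) := by
  unfold plan_clip_durations
  rw [pvAllowed_eq]
  rfl

-- ===== VERDICT (by name: the statement is the Claim_ definition above) =====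
theorem plan_clip_durations_spec : Claim_equal_plan_clip_durations := by
  intro t p _
  unfold Spec_plan_clip_durations
  rw [pvAlt_eq, pvA_eq]
  set N : Nat := (max (t + 12) 12).toNat with hNdef
  have hN : max (t + 12) 12 = (N : Int) := by
    rw [hNdef]
    have := le_max_right (t + 12) (12 : Int)
    omega
  rw [hN, pvLoop p N]
  rw [show (PySem.Dict.mk (pvItems p N)).items = pvItems p N from rfl]
  rw [pvViable p N]
  set K : Nat := N / 4 with hKdef
  have hK3 : 3 ≤ K := by
    have := le_max_right (t + 12) (12 : Int)
    omega
  set viable := (List.range K).map (fun i => pvComp p (i + 1)) with hviable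
  have hvne : viable ≠ [] := by
    rw [hviable]
    simp only [ne_eq, List.map_eq_nil_iff, List.range_eq_nil]
    omega
  set S := viable.foldl
    (fun acc c => PySem.List.insertBy (fun x y => pvLex3Lt (pvKeyA t x) (pvKeyA t y)) c acc) []
    with hS
  have hSne : S ≠ [] := pvFoldl_insertBy_ne_nil _ _ _ (Or.inr hvne)
  cases hSeq : S with
  | nil => exact absurd hSeq hSne
  | cons h tl =>
    -- the head is in viable and is minimal
    have hmem : h ∈ viable := by
      have : h ∈ S := by rw [hSeq]; exact List.mem_cons_self ..
      rw [hS, pvFoldl_insertBy_mem] at this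
      simpa using this
    have hmin : ∀ y ∈ viable, pvLex3Lt (pvKeyA t y) (pvKeyA t h) = false := by
      intro y hy
      refine pvFoldl_insertBy_headmin (pvKeyA t) viable [] (by intro _ _ hh; cases hh) h tl ?_ y ?_
      · rw [← hS]; exact hSeq
      · rw [← hS] at *; rw [pvFoldl_insertBy_mem]; exact Or.inr hy
    obtain ⟨i, hi, hih⟩ : ∃ i, i ∈ List.range K ∧ pvComp p (i + 1) = h := by
      rw [hviable] at hmem
      exact List.mem_map.mp hmem
    have hiK : i < K := List.mem_range.mp hi
    set ks : Nat := pvKStar t with hksdef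
    have hks1 : 1 ≤ ks := pvKStar_pos t
    have hksK : ks ≤ K := by
      have h1 := pvKStar_le t
      rw [hN] at h1
      omega
    have hkmem : pvComp p ks ∈ viable := by
      rw [hviable]
      refine List.mem_map.mpr ⟨ks - 1, List.mem_range.mpr (by omega), ?_⟩
      congr 1
      omega
    have heq : i + 1 = ks := by
      by_contra hne
      have hlt := pvKey_min t (i + 1) (by omega) (fun hx => hne hx)
      rw [← pvKeyA_comp t p, ← pvKeyA_comp t p (i + 1), hih] at hlt
      have hfalse := hmin (pvComp p ks) hkmem
      rw [hlt] at hfalse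
      cases hfalse
    rw [← hih, heq]
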